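/- GENERATED by c/gen_decode.py: decode facts of the image, one per distinct instruction byte string. -/
import UserX.DecodeImage

#decode_all ProgX.Base.Dec
  "0fb6920000c000"  -- movzx edx,BYTE PTR [rdx+0xc00000]
  "4801f8"  -- add rax,rdi
  "4883ec18"  -- sub rsp,0x18
  "4889e8"  -- mov rax,rbp
  "488d9a40008000"  -- lea rbx,[rdx+0x800040]
  "4989d7"  -- mov r15,rdx
  "4c89ea"  -- mov rdx,r13
  "660f2fc1"  -- comisd xmm0,xmm1
  "7332"  -- jae 101639
  "760d"  -- jbe 1023b9
  "80b90000c00000"  -- cmp BYTE PTR [rcx+0xc00000],0x0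
  "b900000000"  -- mov ecx,0x0
  "e821fdffff"  -- call 100059
  "e8ab050000"  -- call 104100
  "eb02"  -- jmp 1022a4
  "ebfd"  -- jmp 100056
  "f20f5805afd70300"  -- addsd xmm0,QWORD PTR [rip+0x3d7af]
  "f20f59cc"  -- mulsd xmm1,xmm4
  "f20f5e1d90e10300"  -- divsd xmm3,QWORD PTR [rip+0x3e190]
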